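-- pv_equiv track=rewrite | github.com/rilianx/cpmp | jupyter_notebooks/Pixie.py | comparacion
-- ===== SOURCE A (Python) =====
-- import copy
--
-- def comparacion(stack):
--     sort=copy.deepcopy(stack)
--     sort.sort(reverse=True)
--     copia=copy.deepcopy(stack)
--
--     contador = 0
--
--     while sort != copia:
--
--         sort.pop(len(sort)-1)
--         copia.pop(len(copia)-1)
--         contador += 1
--
--
--     return contador
-- ===== SOURCE B (Python) =====
-- def comparacion(stack):
--     s = sorted(stack, reverse=True)
--     for i, (x, y) in enumerate(zip(stack, s)):
--         if x != y:
--             return len(stack) - i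
--     return 0
-- ===== Notes on version B (the rewrite author's own statement) =====
-- stated objective: faster
-- what changed: Instead of repeatedly popping the last element of both full copies until the lists compare equal (a full list comparison per iteration), B sorts once and makes a single front-to-back scan to the first position where the stack disagrees with its descending sort, returning n - that index.
import Mathlib
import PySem

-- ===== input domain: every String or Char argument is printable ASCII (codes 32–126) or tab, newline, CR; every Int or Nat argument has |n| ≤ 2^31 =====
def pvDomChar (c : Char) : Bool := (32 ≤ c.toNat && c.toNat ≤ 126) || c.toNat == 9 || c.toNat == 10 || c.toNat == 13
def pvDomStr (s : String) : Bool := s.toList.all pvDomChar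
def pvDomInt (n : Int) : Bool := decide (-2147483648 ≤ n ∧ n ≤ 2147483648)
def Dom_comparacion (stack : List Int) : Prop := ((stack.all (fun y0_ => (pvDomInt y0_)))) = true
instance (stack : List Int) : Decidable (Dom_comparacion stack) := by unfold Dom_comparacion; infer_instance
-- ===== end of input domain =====

-- B replaces A's pop-both-lists-until-equal loop (one full list comparison per pop) by one
-- descending sort and a single front-to-back scan to the first mismatch; return value only.

-- ===== PORT A =====
-- the while loop: 'sort.pop(len(sort)-1)' removes the LAST element, i.e. dropLast.
-- (inside comparacion the two lists always have equal length, so pop is never called on an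
-- empty list; dropLast is exact there.)
def comparacionLoop : List Int → List Int → Int → Int
  | sort, copia, contador =>
    if sort = copia then contador
    else comparacionLoop sort.dropLast copia.dropLast (contador + 1)
termination_by sort copia _ => sort.length + copia.length
decreasing_by
  simp only [List.length_dropLast]
  have hne : sort ≠ [] ∨ copia ≠ [] := by
    cases sort with
    | nil => cases copia with
      | nil => simp_all
      | cons y ys => exact Or.inr (by simp)
    | cons x xs => exact Or.inl (by simp)
  rcases hne with h | h
  · have : 0 < sort.length := List.length_pos_iff.mpr h; omega
  · have : 0 < copia.length := List.length_pos_iff.mpr h; omega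

def comparacion (stack : List Int) : Int :=
  -- sort = deepcopy(stack); sort.sort(reverse=True); copia = deepcopy(stack); contador = 0
  comparacionLoop (PySem.List.sorted stack (fun x => x) true) stack 0

-- ===== PORT B =====
-- for i, (x, y) in enumerate(zip(stack, s)): if x != y: return len(stack) - i ; return 0
def comparacionAltGo (n : Int) : List Int → List Int → Int → Int
  | x :: xs, y :: ys, i => if x ≠ y then n - i else comparacionAltGo n xs ys (i + 1)
  | _, _, _ => 0

def comparacion_alt (stack : List Int) : Int :=
  comparacionAltGo (stack.length : Int) stack (PySem.List.sorted stack (fun x => x) true) 0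

-- ===== PRECONDITION & SPEC =====
def Spec_comparacion (stack : List Int) (out : Int) : Prop := out = comparacion_alt stack
instance (stack : List Int) (out : Int) : Decidable (Spec_comparacion stack out) := by unfold Spec_comparacion; infer_instance

-- ===== CLAIM (what is proved, stated in full; the proofs are below) =====
def Claim_equal_comparacion : Prop := ∀ (stack : List Int), Dom_comparacion stack → Spec_comparacion stack (comparacion stack)

-- ===== LEMMAS AND PROOFS =====

-- length of the common prefix on which the two lists agree pointwise
def fmAgree : List Int → List Int → Nat
  | x :: xs, y :: ys => if x = y then fmAgree xs ys + 1 else 0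
  | _, _ => 0

theorem fmAgree_comm : ∀ a b : List Int, fmAgree a b = fmAgree b a := by
  intro a
  induction a with
  | nil => intro b; cases b <;> rfl
  | cons x xs ih =>
    intro b
    cases b with
    | nil => rfl
    | cons y ys =>
      simp only [fmAgree]
      by_cases h : x = y
      · subst h; simp [ih]
      · have h' : ¬ y = x := fun hyx => h hyx.symm
        rw [if_neg h, if_neg h']

theorem altGo_self (n : Int) : ∀ (a : List Int) (i : Int), comparacionAltGo n a a i = 0 := by
  intro a
  induction a with
  | nil => intro i; rfl
  | cons x xs ih => intro i; simp [comparacionAltGo, ih]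

theorem altGo_ne (n : Int) : ∀ (a b : List Int) (i : Int), a.length = b.length → a ≠ b →
    comparacionAltGo n a b i = n - i - (fmAgree a b : Int) := by
  intro a
  induction a with
  | nil => intro b i hl hne; cases b <;> simp_all
  | cons x xs ih =>
    intro b i hl hne
    cases b with
    | nil => simp at hl
    | cons y ys =>
      by_cases h : x = y
      · subst h
        have hxs : xs ≠ ys := by intro h'; exact hne (by rw [h'])
        simp only [comparacionAltGo, fmAgree, ne_eq, not_true_eq_false, if_false]
        rw [ih ys (i + 1) (by simpa using hl) hxs]
        push_cast; ring
      · simp [comparacionAltGo, fmAgree, h]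

theorem fmAgree_dropLast_eq : ∀ a b : List Int, a.length = b.length → a ≠ b →
    a.dropLast = b.dropLast → (fmAgree a b : Int) = (a.length : Int) - 1 := by
  intro a
  induction a with
  | nil => intro b hl hne _; cases b <;> simp_all
  | cons x xs ih =>
    intro b hl hne hd
    cases b with
    | nil => simp at hl
    | cons y ys =>
      cases xs with
      | nil =>
        cases ys with
        | nil =>
          have hxy : x ≠ y := by intro h; exact hne (by rw [h])
          simp [fmAgree, hxy]
        | cons z zs => simp at hl
      | cons x' xs' =>
        cases ys with
        | nil => simp at hl
        | cons y' ys' =>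
          have hd' : x :: (x' :: xs').dropLast = y :: (y' :: ys').dropLast := by
            simpa [List.dropLast] using hd
          have hx : x = y := by injection hd'
          have htl : (x' :: xs').dropLast = (y' :: ys').dropLast := by injection hd'
          subst hx
          have hxs : (x' :: xs') ≠ (y' :: ys') := by
            intro h; exact hne (by rw [h])
          have hthis := ih (y' :: ys') (by simpa using hl) hxs htl
          have hstep : fmAgree (x :: x' :: xs') (x :: y' :: ys')
              = fmAgree (x' :: xs') (y' :: ys') + 1 := by simp [fmAgree]
          rw [hstep]
          push_cast [List.length_cons] at hthis ⊢
          omega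

theorem fmAgree_cons_eq (x : Int) (u v : List Int) :
    fmAgree (x :: u) (x :: v) = fmAgree u v + 1 := by simp [fmAgree]

theorem fmAgree_dropLast_ne : ∀ a b : List Int, a.length = b.length →
    a.dropLast ≠ b.dropLast → fmAgree a b = fmAgree a.dropLast b.dropLast := by
  intro a
  induction a with
  | nil => intro b hl hd; cases b <;> simp_all
  | cons x xs ih =>
    intro b hl hd
    cases b with
    | nil => simp at hl
    | cons y ys =>
      cases xs with
      | nil =>
        cases ys with
        | nil => simp at hd
        | cons z zs => simp at hl
      | cons x' xs' =>
        cases ys with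
        | nil => simp at hl
        | cons y' ys' =>
          have hdl : (x :: x' :: xs').dropLast = x :: (x' :: xs').dropLast := rfl
          have hdr : (y :: y' :: ys').dropLast = y :: (y' :: ys').dropLast := rfl
          rw [hdl, hdr] at hd ⊢
          by_cases h : x = y
          · subst h
            have htl : (x' :: xs').dropLast ≠ (y' :: ys').dropLast := by
              intro h'; exact hd (by rw [h'])
            rw [fmAgree_cons_eq, fmAgree_cons_eq, ih (y' :: ys') (by simpa using hl) htl]
          · have h' : ¬ y = x := fun hyx => h hyx.symm
            simp only [fmAgree]
            rw [if_neg h, if_neg h]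

theorem loop_eq : ∀ (m : Nat) (a b : List Int) (k : Int), a.length + b.length ≤ m →
    a.length = b.length →
    comparacionLoop a b k =
      k + (if a = b then 0 else (a.length : Int) - (fmAgree a b : Int)) := by
  intro m
  induction m with
  | zero =>
    intro a b k hm hl
    have : a = [] := by cases a <;> simp_all
    have : b = [] := by cases b <;> simp_all
    subst_vars
    simp [comparacionLoop]
  | succ m ih =>
    intro a b k hm hl
    by_cases heq : a = b
    · subst heq; simp [comparacionLoop]
    · rw [comparacionLoop, if_neg heq, if_neg heq]
      have hane : a ≠ [] := by
        intro h; subst h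
        have : b = [] := by cases b <;> simp_all
        exact heq this.symm
      have hpos : 0 < a.length := List.length_pos_iff.mpr hane
      have hl' : a.dropLast.length = b.dropLast.length := by
        simp [List.length_dropLast, hl]
      have hm' : a.dropLast.length + b.dropLast.length ≤ m := by
        simp only [List.length_dropLast]; omega
      by_cases hd : a.dropLast = b.dropLast
      · rw [ih a.dropLast b.dropLast (k + 1) hm' hl', if_pos hd]
        have := fmAgree_dropLast_eq a b hl heq hd
        omega
      · rw [ih a.dropLast b.dropLast (k + 1) hm' hl', if_neg hd]
        rw [← fmAgree_dropLast_ne a b hl hd]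
        simp only [List.length_dropLast]
        omega

-- ===== VERDICT (by name: the statement is the Claim_ definition above) =====
theorem comparacion_spec : Claim_equal_comparacion := by
  intro stack _
  unfold Spec_comparacion comparacion comparacion_alt
  set s := PySem.List.sorted stack (fun x => x) true with hs
  have hlen : s.length = stack.length := PySem.List.length_sorted ..
  rw [loop_eq (s.length + stack.length) s stack 0 le_rfl hlen]
  by_cases heq : stack = s
  · rw [if_pos heq.symm, ← heq, altGo_self]; norm_num
  · rw [if_neg (fun h => heq h.symm),
      altGo_ne (stack.length : Int) stack s 0 hlen.symm heq,
      fmAgree_comm s stack, hlen]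
    ring
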